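-- pv_equiv track=rewrite | github.com/inforsenia/utils | listados-asterisquizador/python-alumnos-por-grupo-a-csv.py | lopdize
-- ===== SOURCE A (Python) =====
-- def lopdize(aux):
-- 	apelFinal = ""
--
-- 	for auxp in aux.split(" "):
-- 		auxf = auxp[0:2]
--
-- 		sasteriscos = ""
-- 		nasteriscos = len(auxp)-2
-- 		for i in range(nasteriscos):
-- 			sasteriscos += "*"
--
-- 		#apelFinal+=auxf.capitalize()+sasteriscos+" "
-- 		apelFinal+=auxf+sasteriscos+" "
--
-- 	return(apelFinal)
-- ===== SOURCE B (Python) =====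
-- def lopdize(aux):
--     # Single pass over the characters, no split(): keep a counter of
--     # non-space characters seen in the current word; first two kept,
--     # rest replaced by '*'; one extra space appended at the end
--     # (matching the trailing space A emits after the last word).
--     out = []
--     n = 0
--     for c in aux:
--         if c == ' ':
--             out.append(' ')
--             n = 0
--         else:
--             out.append(c if n < 2 else '*')
--             n += 1
--     out.append(' ')
--     return ''.join(out)
-- ===== Notes on version B (the rewrite author's own statement) =====
-- stated objective: simpler
-- what changed: Replaces split-on-space plus per-word slicing and a star-building inner loop with a single character-by-character pass that keeps a per-word counter and joins once at the end.
import Mathlib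
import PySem

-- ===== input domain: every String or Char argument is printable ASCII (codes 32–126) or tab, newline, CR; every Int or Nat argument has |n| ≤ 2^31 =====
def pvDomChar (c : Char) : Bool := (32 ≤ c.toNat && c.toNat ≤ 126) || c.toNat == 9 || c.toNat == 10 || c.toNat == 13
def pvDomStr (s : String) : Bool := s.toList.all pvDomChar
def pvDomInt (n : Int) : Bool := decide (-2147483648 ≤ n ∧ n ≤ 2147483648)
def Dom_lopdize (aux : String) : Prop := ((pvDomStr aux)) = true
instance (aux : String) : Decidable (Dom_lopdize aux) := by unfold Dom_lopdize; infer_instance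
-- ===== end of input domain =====

-- B: single character-by-character pass with a per-word counter instead of split(" ") + per-word slicing + a star-building inner loop; same return value.


-- ===== PORT A =====
-- aux.split(" "), then per word: auxf = auxp[0:2], a loop appending '*' len-2 times, apelFinal += auxf+stars+" "
def lopdize (aux : String) : String :=
  String.ofList
    ((PySem.Chars.splitOn aux.toList [' ']).foldl
      (fun apelFinal auxp =>
        let auxf := PySem.List.slice auxp (some 0) (some 2)
        let sasteriscos := (PySem.List.pyRange 0 ((auxp.length : Int) - 2) 1).foldl
          (fun s _ => s ++ ['*']) ([] : List Char)
        apelFinal ++ auxf ++ sasteriscos ++ [' '])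
      [])

-- ===== PORT B =====
-- one pass: counter of non-space chars in the current word; keep if < 2 else '*'; reset on ' '; one trailing space
def lopdize_alt (aux : String) : String :=
  String.ofList
    ((aux.toList.foldl
      (fun (p : List Char × Nat) c =>
        if c = ' ' then (p.1 ++ [' '], 0)
        else (p.1 ++ [if p.2 < 2 then c else '*'], p.2 + 1))
      (([] : List Char), 0)).1 ++ [' '])

-- ===== PRECONDITION & SPEC =====
def Spec_lopdize (aux : String) (out : String) : Prop := out = lopdize_alt aux
instance (aux : String) (out : String) : Decidable (Spec_lopdize aux out) := by unfold Spec_lopdize; infer_instance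

-- ===== CLAIM (what is proved, stated in full; the proofs are below) =====
def Claim_equal_lopdize : Prop := ∀ (aux : String), Dom_lopdize aux → Spec_lopdize aux (lopdize aux)

-- ===== LEMMAS AND PROOFS =====

-- what B emits while the counter is n (proof-side characterisation of B's pass)
def mask2 (n : Nat) : List Char → List Char
  | [] => []
  | c :: cs => if c = ' ' then ' ' :: mask2 0 cs else (if n < 2 then c else '*') :: mask2 (n + 1) cs

-- split on a single space with the word accumulated so far (proof-side characterisation of splitOn)
def pysplit (pre : List Char) : List Char → List (List Char)
  | [] => [pre]
  | c :: cs => if c = ' ' then pre :: pysplit [] cs else pysplit (pre ++ [c]) cs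

-- A's per-word value: first two characters, then stars
def maskW (w : List Char) : List Char := w.take 2 ++ List.replicate (w.length - 2) '*'

theorem splitOn_go_eq (cs : List Char) : ∀ (fuel : Nat) (cur : List Char) (acc : List (List Char)),
    cs.length ≤ fuel →
    PySem.Chars.splitOn.go [' '] fuel cs cur acc = acc.reverse ++ pysplit cur.reverse cs := by
  induction cs with
  | nil =>
    intro fuel cur acc _
    cases fuel <;> simp [PySem.Chars.splitOn.go, pysplit]
  | cons c cs ih =>
    intro fuel cur acc h
    cases fuel with
    | zero => simp at h
    | succ f =>
      by_cases hc : c = ' '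
      · subst hc
        show PySem.Chars.splitOn.go [' '] (f + 1) (' ' :: cs) cur acc = _
        have : ([' '] : List Char).isPrefixOf (' ' :: cs) = true := by
          simp [List.isPrefixOf]
        simp only [PySem.Chars.splitOn.go, this, if_true, List.drop, List.length]
        rw [ih f [] (cur.reverse :: acc) (by simpa using Nat.lt_succ_iff.mp (by simpa using h))]
        simp [pysplit]
      · have hpre : ([' '] : List Char).isPrefixOf (c :: cs) = false := by
          simp [List.isPrefixOf]; intro h'; exact hc h'.symm
        show PySem.Chars.splitOn.go [' '] (f + 1) (c :: cs) cur acc = _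
        simp only [PySem.Chars.splitOn.go, hpre, Bool.false_eq_true, if_false]
        rw [ih f (c :: cur) acc (by simpa using Nat.lt_succ_iff.mp (by simpa using h))]
        simp [pysplit, hc]

theorem splitOn_eq_pysplit (cs : List Char) :
    PySem.Chars.splitOn cs [' '] = pysplit [] cs := by
  unfold PySem.Chars.splitOn
  rw [splitOn_go_eq cs (cs.length + 1) [] [] (by omega)]
  simp

-- the star-building inner loop of A builds a replicate
theorem stars_foldl (l : List Int) : ∀ (s : List Char),
    l.foldl (fun s _ => s ++ ['*']) s = s ++ List.replicate l.length '*' := by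
  induction l with
  | nil => simp
  | cons x l ih =>
    intro s
    rw [List.foldl_cons, ih]
    simp [List.replicate_succ]

-- A's per-word computation equals maskW
theorem word_eq (w : List Char) :
    PySem.List.slice w (some 0) (some 2) ++
      (PySem.List.pyRange 0 ((w.length : Int) - 2) 1).foldl (fun s _ => s ++ ['*']) [] =
    maskW w := by
  have h1 : PySem.List.slice w (some 0) (some 2) = w.take 2 := by
    rw [PySem.List.slice_zero_start, PySem.List.slice_to w (by omega)]
    rfl
  have h2 : (PySem.List.pyRange 0 ((w.length : Int) - 2) 1).length = w.length - 2 := by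
    rw [PySem.List.length_pyRange_one]; omega
  rw [h1, stars_foldl, h2, maskW]
  simp

theorem maskW_snoc (pre : List Char) (c : Char) :
    maskW (pre ++ [c]) = maskW pre ++ [if pre.length < 2 then c else '*'] := by
  unfold maskW
  by_cases h : pre.length < 2
  · rw [if_pos h]
    interval_cases hl : pre.length
    · match pre, hl with
      | [], _ => simp
    · match pre, hl with
      | [a], _ => simp
  · rw [if_neg h]
    have h3 : (pre ++ [c]).take 2 = pre.take 2 := by
      rw [List.take_append_of_le_length (by omega)]
    have h4 : (pre ++ [c]).length - 2 = (pre.length - 2) + 1 := by simp; omega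
    rw [h3, h4, List.replicate_succ', List.append_assoc]

-- A's flatMap over a split piece equals B's counter-driven emission
theorem mask_flat (cs : List Char) : ∀ (pre : List Char),
    (pysplit pre cs).flatMap (fun w => maskW w ++ [' ']) =
    maskW pre ++ mask2 pre.length cs ++ [' '] := by
  induction cs with
  | nil => intro pre; simp [pysplit, mask2]
  | cons c cs ih =>
    intro pre
    by_cases hc : c = ' '
    · subst hc
      rw [show pysplit pre (' ' :: cs) = pre :: pysplit [] cs from by simp [pysplit]]
      rw [List.flatMap_cons, ih []]
      simp [mask2, maskW]
    · rw [show pysplit pre (c :: cs) = pysplit (pre ++ [c]) cs from by simp [pysplit, hc]]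
      rw [ih (pre ++ [c]), maskW_snoc]
      simp [mask2, hc]

-- A's outer foldl is a flatMap
theorem foldl_flat (ws : List (List Char)) : ∀ (acc : List Char),
    ws.foldl (fun acc w => acc ++ (maskW w ++ [' '])) acc =
    acc ++ ws.flatMap (fun w => maskW w ++ [' ']) := by
  induction ws with
  | nil => simp
  | cons w ws ih => intro acc; simp [List.foldl, ih, List.flatMap_cons]

-- B's foldl emits mask2
theorem alt_foldl (cs : List Char) : ∀ (acc : List Char) (n : Nat),
    (cs.foldl
      (fun (p : List Char × Nat) c =>
        if c = ' ' then (p.1 ++ [' '], 0)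
        else (p.1 ++ [if p.2 < 2 then c else '*'], p.2 + 1))
      (acc, n)).1 = acc ++ mask2 n cs := by
  induction cs with
  | nil => simp [mask2]
  | cons c cs ih =>
    intro acc n
    by_cases hc : c = ' '
    · subst hc
      simp only [List.foldl_cons, reduceIte]
      rw [ih]
      simp [mask2]
    · simp only [List.foldl_cons, if_neg hc]
      rw [ih]
      simp [mask2, hc]

-- ===== VERDICT (by name: the statement is the Claim_ definition above) =====
theorem lopdize_spec : Claim_equal_lopdize := by
  intro aux _
  show lopdize aux = lopdize_alt aux
  unfold lopdize lopdize_alt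
  rw [splitOn_eq_pysplit]
  have hfun : (fun (apelFinal auxp : List Char) =>
      let auxf := PySem.List.slice auxp (some 0) (some 2)
      let sasteriscos := (PySem.List.pyRange 0 ((auxp.length : Int) - 2) 1).foldl
        (fun s _ => s ++ ['*']) ([] : List Char)
      apelFinal ++ auxf ++ sasteriscos ++ [' ']) =
      fun acc w => acc ++ (maskW w ++ [' ']) := by
    funext acc w
    simp only []
    rw [← word_eq w]
    simp [List.append_assoc]
  rw [hfun, foldl_flat, mask_flat, alt_foldl]
  simp [maskW]
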